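-- pv_equiv track=rewrite | github.com/jrobertson627/adventofcode | year_2022/day2/day2_2022.py | transform_pt2
-- ===== SOURCE A (Python) =====
-- def transform_pt2(play_list):
--     '''
--     Transform strategy guide into a list of ints corresponding to moves
--     Rock: A-> 1, Paper: B -> 2, Scissors: C -> 3
--     My Moves: Y -> Draw, X -> Lose, Z -> Win
--
--     Args:
--         play_list(List of Str): The strategy guide to follow in list format
--             Index 0 refers to the opponents move
--             Index 1 refers to your move
--     Returns:
--         new_list(List of Int): The strategy guide to follow in list format
--             Index 0 refers to the opponents move
--             Index 1 refers to your move
--     '''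
--     new_list = []
--     for row in play_list:
--         if row[0] == 'A':
--             their_play = 1
--         elif row[0] == 'B':
--             their_play = 2
--         else:
--             their_play = 3
--
--         # check if draw
--         if row[1] == 'Y':
--             my_play = their_play
--         # check if lose
--         elif row[1] == 'X':
--             if their_play == 1:
--                 my_play = 3
--             elif their_play == 2:
--                 my_play = 1
--             else:
--                 my_play = 2
--         # check if win
--         else:
--             if their_play == 1:
--                 my_play = 2
--             elif their_play == 2:
--                 my_play = 3
--             else:
--                 my_play = 1
--         new_list.append([their_play, my_play])
--
--     return new_list
-- ===== SOURCE B (Python) =====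
-- def transform_pt2(play_list):
--     # Staged column-wise passes: decode the opponent column and the outcome
--     # column separately via str.find, then zip them through one modular
--     # formula -- no per-row branching on play values.
--     theirs = ["AB".find(row[0]) % 3 + 1 for row in play_list]
--     outcomes = ["XY".find(row[1]) for row in play_list]
--     return [[t, (t + f - 2) % 3 + 1] for t, f in zip(theirs, outcomes)]
-- ===== Notes on version B (the rewrite author's own statement) =====
-- stated objective: alternative
-- what changed: Rewrites A's single loop with a nested nine-way win/lose/draw case table into staged column-wise passes: one map decoding the opponent column and one the outcome column via str.find, zipped through a single closed-form modular formula with no per-row branching.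
import Mathlib
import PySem

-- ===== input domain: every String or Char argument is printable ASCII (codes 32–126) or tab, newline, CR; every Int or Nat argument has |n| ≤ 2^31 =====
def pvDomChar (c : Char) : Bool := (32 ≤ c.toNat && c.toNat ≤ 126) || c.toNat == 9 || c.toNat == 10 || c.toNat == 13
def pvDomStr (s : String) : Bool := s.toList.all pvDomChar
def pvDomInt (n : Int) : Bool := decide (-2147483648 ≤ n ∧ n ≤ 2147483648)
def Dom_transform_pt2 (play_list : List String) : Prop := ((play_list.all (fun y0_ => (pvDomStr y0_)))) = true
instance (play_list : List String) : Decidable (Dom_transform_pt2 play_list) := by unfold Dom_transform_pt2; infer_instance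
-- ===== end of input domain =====

-- B replaces A's loop with its nested nine-way case table by staged column-wise map passes (str.find per column) zipped through one modular formula; same O(n) cost (alternative, not faster).

-- ===== PORT A =====
-- one row of A: row[0]/row[1] indexed (none = IndexError, excluded by Pre_), then the nested case table
def pvRowA (row : String) : List Int :=
  match PySem.Str.pyGet? row 0, PySem.Str.pyGet? row 1 with
  | some c0, some c1 =>
    let their_play : Int := if c0 = 'A' then 1 else if c0 = 'B' then 2 else 3
    let my_play : Int :=
      if c1 = 'Y' then their_play
      else if c1 = 'X' then
        (if their_play = 1 then 3 else if their_play = 2 then 1 else 2)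
      else
        (if their_play = 1 then 2 else if their_play = 2 then 3 else 1)
    [their_play, my_play]
  | _, _ => []  -- unreachable under Pre_transform_pt2 (Python raises IndexError here)

def transform_pt2 (play_list : List String) : List (List Int) :=
  play_list.foldl (fun new_list row => new_list ++ [pvRowA row]) []

-- ===== PORT B =====
-- column 1 of B: "AB".find(row[0]) % 3 + 1  (none = IndexError, excluded by Pre_)
def pvTheir (row : String) : Int :=
  match PySem.Str.pyGet? row 0 with
  | some c => PySem.Int.mod (PySem.Str.find "AB" (String.ofList [c])) 3 + 1
  | none => 0  -- unreachable under Pre_transform_pt2 (Python raises IndexError here)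

-- column 2 of B: "XY".find(row[1])  (none = IndexError, excluded by Pre_)
def pvOutcome (row : String) : Int :=
  match PySem.Str.pyGet? row 1 with
  | some c => PySem.Str.find "XY" (String.ofList [c])
  | none => 0  -- unreachable under Pre_transform_pt2 (Python raises IndexError here)

-- B: two column passes, then a zip through the modular outcome formula
def transform_pt2_alt (play_list : List String) : List (List Int) :=
  let theirs := play_list.map pvTheir
  let outcomes := play_list.map pvOutcome
  (theirs.zip outcomes).map (fun p => [p.1, PySem.Int.mod (p.1 + p.2 - 2) 3 + 1])

-- ===== PRECONDITION & SPEC =====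
-- Pre_ excludes exactly the inputs on which both Pythons raise IndexError: a row shorter than 2 characters.
def Pre_transform_pt2 (play_list : List String) : Prop :=
  ∀ row ∈ play_list, 2 ≤ row.toList.length
instance (play_list : List String) : Decidable (Pre_transform_pt2 play_list) := by
  unfold Pre_transform_pt2; infer_instance

def pvWitness_transform_pt2 : List String := ["AY", "CX", "BZ"]

def Spec_transform_pt2 (play_list : List String) (out : List (List Int)) : Prop := out = transform_pt2_alt play_list
instance (play_list : List String) (out : List (List Int)) : Decidable (Spec_transform_pt2 play_list out) := by unfold Spec_transform_pt2; infer_instance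

-- ===== CLAIM (what is proved, stated in full; the proofs are below) =====
def Claim_equal_transform_pt2 : Prop := ∀ (play_list : List String), Dom_transform_pt2 play_list → Pre_transform_pt2 play_list → Spec_transform_pt2 play_list (transform_pt2 play_list)

-- ===== LEMMAS AND PROOFS =====

-- find of a single character inside a two-character string, in closed form
lemma find_pair (a b c : Char) :
    PySem.Chars.find [a, b] [c] = if c = a then 0 else if c = b then 1 else -1 := by
  simp [PySem.Chars.find, PySem.Chars.find.go, List.isPrefixOf]

-- on a row of length >= 2, A's case table equals B's per-row value
lemma pvRow_eq (row : String) (h : 2 ≤ row.toList.length) :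
    pvRowA row = [pvTheir row, PySem.Int.mod (pvTheir row + pvOutcome row - 2) 3 + 1] := by
  obtain ⟨c0, c1, t, hrow⟩ : ∃ c0 c1 t, row.toList = c0 :: c1 :: t := by
    match hl : row.toList with
    | [] => rw [hl] at h; simp at h
    | [c] => rw [hl] at h; simp at h
    | c0 :: c1 :: t => exact ⟨c0, c1, t, rfl⟩
  unfold pvRowA pvTheir pvOutcome
  have h0 : PySem.Str.pyGet? row 0 = some c0 := by
    simp [PySem.Str.pyGet?, PySem.Chars.pyGet?, PySem.List.pyGet?, PySem.List.pyIdx?, hrow, show (0:Int) ≤ (t.length:Int) + 1 by positivity]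
  have h1 : PySem.Str.pyGet? row 1 = some c1 := by
    simp [PySem.Str.pyGet?, PySem.Chars.pyGet?, PySem.List.pyGet?, PySem.List.pyIdx?, hrow]
  rw [h0, h1]
  by_cases hA : c0 = 'A' <;> by_cases hB : c0 = 'B' <;>
    by_cases hY : c1 = 'Y' <;> by_cases hX : c1 = 'X' <;>
    simp [PySem.Str.find, find_pair, hA, hB, hY, hX]

-- A's foldl-with-append builds exactly the map of its row function
lemma foldl_append_map (f : String → List Int) (xs : List String) (acc : List (List Int)) :
    xs.foldl (fun l r => l ++ [f r]) acc = acc ++ xs.map f := by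
  induction xs generalizing acc with
  | nil => simp
  | cons x xs ih => simp [List.foldl, ih]

-- ===== VERDICT (by name: the statement is the Claim_ definition above) =====
theorem transform_pt2_spec : Claim_equal_transform_pt2 := by
  intro play_list _ hpre
  unfold Spec_transform_pt2 transform_pt2 transform_pt2_alt
  simp only []
  rw [foldl_append_map, List.nil_append, List.zip_map', List.map_map]
  exact List.map_congr_left (fun row hmem => pvRow_eq row (hpre row hmem))
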